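-- pv_equiv track=rewrite | github.com/tknrsgym/quara | quara/objects/gate_typical.py | split_gate_name_2qutrit_single_base_matrix_into_base_matrix_names_angle
-- ===== SOURCE A (Python) =====
-- from typing import List, Dict, Tuple, Union
--
-- def split_gate_name_2qutrit_single_base_matrix_into_base_matrix_names_angle(
--     gate_name: str,
-- ) -> Dict[str, str]:
--     """Return base matrix names and angle for a given 2-qutrit single base matrix name.
--
--     Parameters
--     ----------
--     gate_names : str
--         Ex. "i01x90", "12yi180", "02z12y90"
--
--     Returns
--     ----------
--     Dict[str, str]
--         key = "base0", "base1", "angle".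
--
--         Ex.
--
--         - {'base0': 'i', 'base1': '01x', 'angle':'90'}
--         - {'base0': '12y', 'base1': 'i', 'angle':'180'}
--         - {'base0': '02z', 'base1': '12y', 'angle':'90'}
--     """
--     l = []
--     a = ""
--     for s in gate_name:
--         if s in ["i", "x", "y", "z"]:
--             a = a + s
--             l.append(a)
--             a = ""
--         else:
--             a = a + s
--     l.append(a)
--
--     assert len(l) == 3
--     res = {"base0": l[0], "base1": l[1], "angle": l[2]}
--     return res
-- ===== SOURCE B (Python) =====
-- def split_gate_name_2qutrit_single_base_matrix_into_base_matrix_names_angle(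
--     gate_name: str,
-- ):
--     idxs = [k for k, c in enumerate(gate_name) if c in "ixyz"]
--     assert len(idxs) == 2
--     i, j = idxs
--     return {
--         "base0": gate_name[: i + 1],
--         "base1": gate_name[i + 1 : j + 1],
--         "angle": gate_name[j + 1 :],
--     }
-- ===== Notes on version B (the rewrite author's own statement) =====
-- stated objective: idiomatic
-- what changed: Replaces the character-accumulation loop (building segments char by char with a running buffer) by computing the two delimiter indices once and slicing the string at them; the assert on exactly two delimiter indices raises AssertionError exactly where A's assert len(l)==3 does.
import Mathlib
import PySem

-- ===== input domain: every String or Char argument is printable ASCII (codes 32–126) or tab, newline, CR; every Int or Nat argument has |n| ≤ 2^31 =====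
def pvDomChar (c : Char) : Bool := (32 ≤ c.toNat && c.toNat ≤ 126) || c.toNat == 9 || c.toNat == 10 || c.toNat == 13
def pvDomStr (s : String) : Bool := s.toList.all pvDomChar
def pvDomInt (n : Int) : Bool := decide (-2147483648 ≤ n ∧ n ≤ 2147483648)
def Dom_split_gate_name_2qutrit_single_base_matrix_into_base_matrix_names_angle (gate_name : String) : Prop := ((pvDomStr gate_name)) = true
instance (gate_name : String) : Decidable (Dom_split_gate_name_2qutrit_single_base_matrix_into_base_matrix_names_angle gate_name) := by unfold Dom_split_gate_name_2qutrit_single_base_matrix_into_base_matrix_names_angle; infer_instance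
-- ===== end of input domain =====

-- B replaces A's char-accumulation loop by computing the two delimiter indices and slicing;
-- objective: idiomatic, same cost.

-- ===== PORT A =====
-- A's loop: l is the list of completed segments, a the running buffer (here over List Char).
def gtLoopA : List Char → List (List Char) → List Char → List (List Char)
  | [], l, a => l ++ [a]
  | c :: cs, l, a =>
      if c ∈ (['i', 'x', 'y', 'z'] : List Char) then gtLoopA cs (l ++ [a ++ [c]]) []
      else gtLoopA cs l (a ++ [c])

-- the dict {"base0": l[0], "base1": l[1], "angle": l[2]} after assert len(l) == 3
def gtDictA : List (List Char) → List (String × String)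
  | [b0, b1, ang] => [("base0", String.ofList b0), ("base1", String.ofList b1), ("angle", String.ofList ang)]
  | _ => []  -- assert len(l) == 3 fails: AssertionError, excluded by Pre_

def split_gate_name_2qutrit_single_base_matrix_into_base_matrix_names_angle (gate_name : String) : List (String × String) :=
  gtDictA (gtLoopA gate_name.toList [] [])

-- ===== PORT B =====
-- the comprehension [k for k, c in enumerate(gate_name) if c in "ixyz"]
def gtIdxs : Nat → List Char → List Nat
  | _, [] => []
  | k, c :: cs =>
      if c ∈ (['i', 'x', 'y', 'z'] : List Char) then k :: gtIdxs (k + 1) cs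
      else gtIdxs (k + 1) cs

-- i, j = idxs (after assert len(idxs) == 2), then the three slices
def gtSlicesB (cs : List Char) : List Nat → List (String × String)
  | [i, j] =>
      [("base0", String.ofList (cs.take (i + 1))),
       ("base1", String.ofList ((cs.drop (i + 1)).take (j - i))),
       ("angle", String.ofList (cs.drop (j + 1)))]
  | _ => []  -- assert len(idxs) == 2 fails: AssertionError, excluded by Pre_

def split_gate_name_2qutrit_single_base_matrix_into_base_matrix_names_angle_alt (gate_name : String) : List (String × String) :=
  let cs := gate_name.toList
  gtSlicesB cs (gtIdxs 0 cs)

-- ===== PRECONDITION & SPEC =====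
-- Pre_: exactly two delimiter characters (i/x/y/z); otherwise A's assert raises AssertionError.
def Pre_split_gate_name_2qutrit_single_base_matrix_into_base_matrix_names_angle (gate_name : String) : Prop :=
  (gate_name.toList.filter (fun c => c ∈ (['i', 'x', 'y', 'z'] : List Char))).length = 2
instance (gate_name : String) : Decidable (Pre_split_gate_name_2qutrit_single_base_matrix_into_base_matrix_names_angle gate_name) := by unfold Pre_split_gate_name_2qutrit_single_base_matrix_into_base_matrix_names_angle; infer_instance

def pvWitness_split_gate_name_2qutrit_single_base_matrix_into_base_matrix_names_angle : String := "02z12y90"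

def Spec_split_gate_name_2qutrit_single_base_matrix_into_base_matrix_names_angle (gate_name : String) (out : List (String × String)) : Prop := out = split_gate_name_2qutrit_single_base_matrix_into_base_matrix_names_angle_alt gate_name
instance (gate_name : String) (out : List (String × String)) : Decidable (Spec_split_gate_name_2qutrit_single_base_matrix_into_base_matrix_names_angle gate_name out) := by unfold Spec_split_gate_name_2qutrit_single_base_matrix_into_base_matrix_names_angle; infer_instance

-- ===== CLAIM (what is proved, stated in full; the proofs are below) =====
def Claim_equal_split_gate_name_2qutrit_single_base_matrix_into_base_matrix_names_angle : Prop := ∀ (gate_name : String), Dom_split_gate_name_2qutrit_single_base_matrix_into_base_matrix_names_angle gate_name → Pre_split_gate_name_2qutrit_single_base_matrix_into_base_matrix_names_angle gate_name → Spec_split_gate_name_2qutrit_single_base_matrix_into_base_matrix_names_angle gate_name (split_gate_name_2qutrit_single_base_matrix_into_base_matrix_names_angle gate_name)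

-- ===== LEMMAS AND PROOFS =====

-- A's accumulator l only collects finished segments.
theorem gtLoopA_acc (cs : List Char) : ∀ (l : List (List Char)) (a : List Char),
    gtLoopA cs l a = l ++ gtLoopA cs [] a := by
  induction cs with
  | nil => intro l a; simp [gtLoopA]
  | cons c cs ih =>
      intro l a
      by_cases h : c ∈ (['i', 'x', 'y', 'z'] : List Char)
      · simp only [gtLoopA, if_pos h, List.nil_append]
        rw [ih (l ++ [a ++ [c]]), ih [a ++ [c]]]
        simp
      · simp only [gtLoopA, if_neg h]
        exact ih l (a ++ [c])

theorem gtIdxs_shift (cs : List Char) : ∀ k : Nat,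
    gtIdxs k cs = (gtIdxs 0 cs).map (· + k) := by
  induction cs with
  | nil => intro k; simp [gtIdxs]
  | cons c cs ih =>
      intro k
      by_cases h : c ∈ (['i', 'x', 'y', 'z'] : List Char)
      · simp only [gtIdxs, if_pos h]
        rw [ih (k + 1), ih 1]
        simp [List.map_map]
        intro x _; omega
      · simp only [gtIdxs, if_neg h]
        rw [ih (k + 1), ih 1]
        simp [List.map_map]
        intro x _; omega

theorem gtIdxs_len (cs : List Char) :
    (gtIdxs 0 cs).length = (cs.filter (fun c => c ∈ (['i', 'x', 'y', 'z'] : List Char))).length := by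
  induction cs with
  | nil => simp [gtIdxs]
  | cons c cs ih =>
      by_cases h : c ∈ (['i', 'x', 'y', 'z'] : List Char)
      · have h' : c = 'i' ∨ c = 'x' ∨ c = 'y' ∨ c = 'z' := by simpa using h
        simp [gtIdxs, gtIdxs_shift cs 1, h', ih]
      · have h' : ¬ (c = 'i' ∨ c = 'x' ∨ c = 'y' ∨ c = 'z') := by simpa using h
        simp [gtIdxs, gtIdxs_shift cs 1, h', ih]

-- zero delimiters: the whole rest goes to the running buffer
theorem gtLoopA_zero (cs : List Char) : ∀ a : List Char,
    gtIdxs 0 cs = [] → gtLoopA cs [] a = [a ++ cs] := by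
  induction cs with
  | nil => intro a _; simp [gtLoopA]
  | cons c cs ih =>
      intro a h
      by_cases hc : c ∈ (['i', 'x', 'y', 'z'] : List Char)
      · rw [show gtIdxs 0 (c :: cs) = 0 :: gtIdxs 1 cs from by
            simp only [gtIdxs, if_pos hc]] at h
        simp at h
      · rw [show gtIdxs 0 (c :: cs) = gtIdxs 1 cs from by
            simp only [gtIdxs, if_neg hc], gtIdxs_shift cs 1] at h
        simp only [gtLoopA, if_neg hc]
        rw [ih (a ++ [c]) (List.map_eq_nil_iff.mp h)]
        simp

-- one delimiter at index j: split there
theorem gtLoopA_one (cs : List Char) : ∀ (a : List Char) (j : Nat),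
    gtIdxs 0 cs = [j] → gtLoopA cs [] a = [a ++ cs.take (j + 1), cs.drop (j + 1)] := by
  induction cs with
  | nil => intro a j h; simp [gtIdxs] at h
  | cons c cs ih =>
      intro a j h
      by_cases hc : c ∈ (['i', 'x', 'y', 'z'] : List Char)
      · rw [show gtIdxs 0 (c :: cs) = 0 :: gtIdxs 1 cs from by
            simp only [gtIdxs, if_pos hc], gtIdxs_shift cs 1] at h
        simp at h
        obtain ⟨hj, hrest⟩ := h
        subst hj
        simp only [gtLoopA, if_pos hc, List.nil_append]
        rw [gtLoopA_acc cs [a ++ [c]] [], gtLoopA_zero cs [] hrest]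
        simp
      · rw [show gtIdxs 0 (c :: cs) = gtIdxs 1 cs from by
            simp only [gtIdxs, if_neg hc], gtIdxs_shift cs 1] at h
        rcases hid : gtIdxs 0 cs with _ | ⟨j', rest⟩
        · rw [hid] at h; simp at h
        · rw [hid] at h
          simp at h
          obtain ⟨hj, hrest⟩ := h
          simp only [gtLoopA, if_neg hc]
          rw [ih (a ++ [c]) j' (by rw [hid, hrest])]
          have : j = j' + 1 := by omega
          subst this
          simp

-- two delimiters at indices i, j: the three segments are the three slices
theorem gtLoopA_two (cs : List Char) : ∀ (a : List Char) (i j : Nat),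
    gtIdxs 0 cs = [i, j] →
    gtLoopA cs [] a = [a ++ cs.take (i + 1), (cs.drop (i + 1)).take (j - i), cs.drop (j + 1)] := by
  induction cs with
  | nil => intro a i j h; simp [gtIdxs] at h
  | cons c cs ih =>
      intro a i j h
      by_cases hc : c ∈ (['i', 'x', 'y', 'z'] : List Char)
      · rw [show gtIdxs 0 (c :: cs) = 0 :: gtIdxs 1 cs from by
            simp only [gtIdxs, if_pos hc], gtIdxs_shift cs 1] at h
        rcases hid : gtIdxs 0 cs with _ | ⟨j', rest⟩
        · rw [hid] at h; simp at h
        · rw [hid] at h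
          simp at h
          obtain ⟨hi, hj, hrest⟩ := h
          simp only [gtLoopA, if_pos hc, List.nil_append]
          rw [gtLoopA_acc cs [a ++ [c]] [],
              gtLoopA_one cs [] j' (by rw [hid, hrest])]
          have h1 : i = 0 := hi.symm
          have h2 : j = j' + 1 := by omega
          subst h1; subst h2
          simp
      · rw [show gtIdxs 0 (c :: cs) = gtIdxs 1 cs from by
            simp only [gtIdxs, if_neg hc], gtIdxs_shift cs 1] at h
        rcases hid : gtIdxs 0 cs with _ | ⟨i', rest⟩
        · rw [hid] at h; simp at h
        · rcases rest with _ | ⟨j', rest'⟩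
          · rw [hid] at h; simp at h
          · rw [hid] at h
            simp at h
            obtain ⟨hi, hj, hrest⟩ := h
            simp only [gtLoopA, if_neg hc]
            rw [ih (a ++ [c]) i' j' (by rw [hid, hrest])]
            have h1 : i = i' + 1 := by omega
            have h2 : j = j' + 1 := by omega
            subst h1; subst h2
            simp [Nat.add_sub_add_right]

-- ===== VERDICT (by name: the statement is the Claim_ definition above) =====
theorem split_gate_name_2qutrit_single_base_matrix_into_base_matrix_names_angle_spec : Claim_equal_split_gate_name_2qutrit_single_base_matrix_into_base_matrix_names_angle := by
  intro gate_name _ hpre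
  unfold Spec_split_gate_name_2qutrit_single_base_matrix_into_base_matrix_names_angle
  unfold Pre_split_gate_name_2qutrit_single_base_matrix_into_base_matrix_names_angle at hpre
  unfold split_gate_name_2qutrit_single_base_matrix_into_base_matrix_names_angle
  unfold split_gate_name_2qutrit_single_base_matrix_into_base_matrix_names_angle_alt
  have hlen : (gtIdxs 0 gate_name.toList).length = 2 := by
    rw [gtIdxs_len]; exact hpre
  rcases hid : gtIdxs 0 gate_name.toList with _ | ⟨i, rest⟩
  · rw [hid] at hlen; simp at hlen
  · rcases rest with _ | ⟨j, rest'⟩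
    · rw [hid] at hlen; simp at hlen
    · rcases rest' with _ | _
      · rw [gtLoopA_two gate_name.toList [] i j hid]
        show gtDictA _ = gtSlicesB gate_name.toList (gtIdxs 0 gate_name.toList)
        rw [hid]
        simp [gtDictA, gtSlicesB]
      · rw [hid] at hlen; simp at hlen
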